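-- pv_equiv track=rewrite | github.com/nameShuffle/calculation_methods_homework | orthogonal_polynomials/chebyshev_lagerr_polynomial.py | find_derivative
-- ===== SOURCE A (Python) =====
-- a = 1
--
-- def find_derivative(n):
--     coefficients = [0] * (n + a)
--     coefficients.append(1)
--
--     for move in range(1, n + 1):
--         previous_coefficients = coefficients.copy()
--         previous_coefficients.append(0)
--         coefficients = [0] * len(previous_coefficients)
--
--         for degree in range(len(coefficients)):
--             if degree != 0:
--                 coefficients[degree - 1] += previous_coefficients[degree] * degree
--             coefficients[degree] += previous_coefficients[degree] * (-1)
--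
--     for i in range(n + 1):
--         coefficients[i] = coefficients[i + a]
--
--     coefficients = coefficients[:n + 1]
--
--     return coefficients
-- ===== SOURCE B (Python) =====
-- a = 1
--
-- def find_derivative(n):
--     # closed form: result[j] = C(n,j)*(n+1)!/(j+1)! with alternating sign, built incrementally in one pass
--     t = 1
--     for k in range(2, n + 2):   # t = (n+1)!
--         t *= k
--     coefficients = []
--     for j in range(n + 1):
--         coefficients.append(t)
--         t = -t * (n - j) // ((j + 1) * (j + 2))
--     return coefficients
-- ===== Notes on version B (the rewrite author's own statement) =====
-- stated objective: faster
-- what changed: Replaces the n repeated symbolic applications of (d/dx - 1) to an ever-growing coefficient list by the closed form coefficients[j] = C(n,j)*(n+1)!/(j+1)! with alternating sign, computed incrementally in a single pass with one exact integer division per term.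
import Mathlib
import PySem

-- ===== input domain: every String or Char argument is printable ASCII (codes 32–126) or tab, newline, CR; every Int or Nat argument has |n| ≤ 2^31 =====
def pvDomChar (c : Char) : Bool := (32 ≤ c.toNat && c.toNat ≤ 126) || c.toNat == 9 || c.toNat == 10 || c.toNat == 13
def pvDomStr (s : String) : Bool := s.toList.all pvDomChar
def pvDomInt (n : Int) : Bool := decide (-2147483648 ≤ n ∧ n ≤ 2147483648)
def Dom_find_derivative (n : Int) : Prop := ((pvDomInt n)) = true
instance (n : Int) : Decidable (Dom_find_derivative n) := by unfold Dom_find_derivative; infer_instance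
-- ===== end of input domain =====

-- B replaces A's n-fold symbolic application of (d/dx - 1) by the closed form
-- coefficients[j] = C(n,j)*(n+1)!/(j+1)! with alternating sign, computed incrementally in one pass (measured faster).

-- ===== PORT A =====
-- module-level constant `a = 1`
def pvA : Int := 1

-- the inner `for degree in range(len(coefficients))` loop of A, acting on
-- previous_coefficients (which already carries the appended 0)
def pvInner (prev : List Int) : List Int :=
  (List.range prev.length).foldl
    (fun c degree =>
      let c := if degree ≠ 0 then
          c.set (degree - 1) (c.getD (degree - 1) 0 + prev.getD degree 0 * (degree : Int))
        else c
      c.set degree (c.getD degree 0 + prev.getD degree 0 * (-1)))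
    (List.replicate prev.length 0)

def find_derivative (n : Int) : List Int :=
  let coefficients : List Int := List.replicate (n + pvA).toNat 0 ++ [1]
  let coefficients := (PySem.List.pyRange 1 (n + 1) 1).foldl
    (fun coefficients _move => pvInner (coefficients ++ [0])) coefficients
  let coefficients := (PySem.List.pyRange 0 (n + 1) 1).foldl
    (fun c i => c.set i.toNat (c.getD (i + pvA).toNat 0)) coefficients
  PySem.List.slice coefficients none (some (n + 1))

-- ===== PORT B =====
def find_derivative_alt (n : Int) : List Int :=
  let t := (PySem.List.pyRange 2 (n + 2) 1).foldl (fun t k => t * k) (1 : Int)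
  ((PySem.List.pyRange 0 (n + 1) 1).foldl
    (fun (s : List Int × Int) j =>
      (s.1 ++ [s.2], PySem.Int.floordiv (-s.2 * (n - j)) ((j + 1) * (j + 2))))
    ([], t)).1

-- ===== PRECONDITION & SPEC =====
def Spec_find_derivative (n : Int) (out : List Int) : Prop := out = find_derivative_alt n
instance (n : Int) (out : List Int) : Decidable (Spec_find_derivative n out) := by unfold Spec_find_derivative; infer_instance

-- ===== CLAIM (what is proved, stated in full; the proofs are below) =====
def Claim_equal_find_derivative : Prop := ∀ (n : Int), Dom_find_derivative n → Spec_find_derivative n (find_derivative n)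

-- ===== LEMMAS AND PROOFS =====

-- basic helpers
lemma pyRange_nil {a b : Int} (h : b ≤ a) : PySem.List.pyRange a b 1 = [] := by
  simp [PySem.List.pyRange]
  omega

lemma set_map_range {g : Nat → Int} {L i : Nat} (_hi : i < L) (v : Int) :
    ((List.range L).map g).set i v = (List.range L).map (fun d => if d = i then v else g d) := by
  apply List.ext_getElem
  · simp
  · intro j h1 h2
    simp only [List.getElem_set, List.getElem_map, List.getElem_range]
    by_cases h : i = j
    · simp [h]
    · simp [h, Ne.symm h]

-- characterisation of A's inner loop
def pvFull (g : Nat → Int) (L d : Nat) : Int :=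
  (if d + 1 < L then g (d + 1) * ((d : Int) + 1) else 0) - g d

lemma pvInner_partial (g : Nat → Int) (L : Nat) :
    ∀ k ≤ L, (List.range k).foldl
      (fun c degree =>
        let c := if degree ≠ 0 then
            c.set (degree - 1) (c.getD (degree - 1) 0 + ((List.range L).map g).getD degree 0 * (degree : Int))
          else c
        c.set degree (c.getD degree 0 + ((List.range L).map g).getD degree 0 * (-1)))
      (List.replicate L 0)
    = (List.range L).map (fun d => if d + 1 < k then pvFull g L d else if d + 1 = k then -g d else 0) := by
  intro k hk
  induction k with
  | zero =>
    simp
  | succ k ih =>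
    rw [List.range_succ, List.foldl_append, ih (by omega)]
    simp only [List.foldl_cons, List.foldl_nil]
    have hkL : k < L := hk
    by_cases hk0 : k = 0
    · subst hk0
      simp only [ne_eq, not_true_eq_false, reduceIte]
      rw [PySem.List.getD_map_range _ _ _ _ hkL, set_map_range hkL]
      apply List.map_congr_left
      intro d hd
      simp only [List.mem_range] at hd
      split_ifs <;> (first | rfl | omega | simp_all)
    · simp only [ne_eq, hk0, not_false_eq_true, if_pos]
      have hk1L : k - 1 < L := by omega
      rw [PySem.List.getD_map_range g L k 0 hkL]
      rw [PySem.List.getD_map_range _ L (k-1) 0 hk1L, set_map_range hk1L]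
      have hgd : ∀ (v : Int), ((List.range L).map (fun d => if d = k - 1 then v else if d + 1 < k then pvFull g L d else if d + 1 = k then -g d else 0)).getD k 0 = (0:Int) := by
        intro v
        rw [PySem.List.getD_map_range _ _ _ _ hkL]
        split_ifs <;> omega
      rw [hgd, set_map_range hkL]
      apply List.map_congr_left
      intro d hd
      simp only [List.mem_range] at hd
      by_cases h1 : d = k
      · rw [if_pos h1, if_neg (by omega : ¬ d + 1 < k + 1), if_pos (by omega : d + 1 = k + 1), h1]
        ring
      · rw [if_neg h1]
        by_cases h2 : d = k - 1
        · subst h2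
          rw [if_pos rfl]
          rw [if_neg (by omega : ¬ (k-1) + 1 < k), if_pos (by omega : (k-1) + 1 = k)]
          rw [if_pos (by omega : (k-1) + 1 < k + 1)]
          unfold pvFull
          rw [if_pos (by omega : (k-1) + 1 < L), (by omega : (k-1) + 1 = k)]
          have hc : ((k - 1 : Nat) : Int) + 1 = (k : Int) := by omega
          rw [hc]
          ring
        · rw [if_neg h2]
          split_ifs <;> (first | rfl | omega)

lemma pvInner_eq (g : Nat → Int) (L : Nat) :
    pvInner ((List.range L).map g)
    = (List.range L).map (fun d => (if d + 1 < L then g (d + 1) * ((d : Int) + 1) else 0) - g d) := by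
  unfold pvInner
  simp only [List.length_map, List.length_range]
  rw [pvInner_partial g L L le_rfl]
  apply List.map_congr_left
  intro d hd
  simp only [List.mem_range] at hd
  unfold pvFull
  by_cases h : d + 1 < L
  · rw [if_pos h]
  · rw [if_neg h, if_pos (by omega : d + 1 = L), if_neg h]
    ring

-- the closed-form coefficient of x^d after m applications of (d/dx - 1) to x^(N+1)
def pvP (N m d : Nat) : Int :=
  if d ≤ N + 1 then (-1:Int)^(m + (N+1-d)) * (m.choose (N+1-d)) * ((N+1).descFactorial (N+1-d)) else 0

-- B's closed form
def pvC (N j : Nat) : Int := (-1:Int)^j * (N.choose j) * ((N+1).descFactorial (N - j))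

def pvVec (N m : Nat) : List Int := (List.range (N+2+m)).map (pvP N m)

lemma pvP_step (N m d : Nat) :
    pvP N (m+1) d = pvP N m (d+1) * ((d : Int) + 1) - pvP N m d := by
  unfold pvP
  by_cases h1 : d + 1 ≤ N + 1
  · -- d ≤ N; set j := N - d  so N+1-d = j+1, N+1-(d+1) = j
    rw [if_pos (by omega : d ≤ N + 1), if_pos (by omega : d ≤ N + 1), if_pos h1]
    have hj : N + 1 - d = (N - d) + 1 := by omega
    have hj2 : N + 1 - (d + 1) = N - d := by omega
    rw [hj, hj2]
    set j := N - d with hjdef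
    have hdc : (d : Int) + 1 = ((N : Int) + 1 - j) := by omega
    rw [hdc]
    rw [Nat.descFactorial_succ, Nat.choose_succ_succ]
    have hsub : ((N + 1 - j : Nat) : Int) = (N : Int) + 1 - j := by omega
    push_cast [hsub]
    ring
  · -- d ≥ N + 1
    by_cases h2 : d = N + 1
    · subst h2
      rw [if_pos le_rfl, if_pos le_rfl, if_neg (by omega)]
      simp [pow_succ]
    · rw [if_neg (by omega), if_neg (by omega), if_neg (by omega)]
      ring

lemma pvVec_zero (N : Nat) : List.replicate (N+1) (0:Int) ++ [1] = pvVec N 0 := by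
  unfold pvVec
  apply List.ext_getElem
  · simp
  · intro j h1 h2
    simp only [List.getElem_map, List.getElem_range]
    unfold pvP
    have hj2 : j < N + 2 := by simpa using h2
    by_cases h : j < N + 1
    · rw [List.getElem_append_left (by simpa using h)]
      rw [if_pos (by omega)]
      rw [Nat.choose_eq_zero_of_lt (by omega : 0 < N + 1 - j)]
      simp [List.getElem_replicate]
    · have hj : j = N + 1 := by omega
      subst hj
      clear h hj2 h2
      rw [List.getElem_append_right (by simp)]
      simp

lemma pvVec_append_zero (N m : Nat) :
    pvVec N m ++ [0] = (List.range (N+3+m)).map (pvP N m) := by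
  unfold pvVec
  have h : N + 3 + m = (N + 2 + m) + 1 := by omega
  rw [h, List.range_succ, List.map_append]
  congr 1
  simp only [List.map_cons, List.map_nil]
  unfold pvP
  rw [if_neg (by omega)]

lemma pvVec_step (N m : Nat) : pvInner (pvVec N m ++ [0]) = pvVec N (m+1) := by
  rw [pvVec_append_zero, pvInner_eq]
  unfold pvVec
  have h : N + 3 + m = N + 2 + (m + 1) := by omega
  rw [h]
  apply List.map_congr_left
  intro d hd
  simp only [List.mem_range] at hd
  rw [pvP_step]
  by_cases hlt : d + 1 < N + 2 + (m + 1)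
  · rw [if_pos hlt]
  · rw [if_neg hlt]
    have : pvP N m (d + 1) = 0 := by
      unfold pvP
      rw [if_neg (by omega)]
    rw [this]
    ring

lemma pvOuter (N : Nat) (m : Nat) :
    (PySem.List.pyRange 1 (1 + (m:Int)) 1).foldl (fun c _ => pvInner (c ++ [0])) (pvVec N 0) = pvVec N m := by
  induction m with
  | zero => rw [show ((1:Int) + (0:Nat)) = 1 by norm_num, pyRange_nil le_rfl]; rfl
  | succ m ih =>
    rw [show ((1:Int) + ((m+1:Nat):Int)) = (1 + (m:Int)) + 1 by push_cast; ring]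
    rw [PySem.List.pyRange_one_succ_right (by omega), List.foldl_append, ih]
    simp only [List.foldl_cons, List.foldl_nil]
    exact pvVec_step N m

lemma pvShift (N : Nat) : ∀ k, k ≤ N + 1 →
    (PySem.List.pyRange 0 (k:Int) 1).foldl (fun c i => c.set i.toNat (c.getD (i + pvA).toNat 0)) (pvVec N N)
    = (List.range (N+2+N)).map (fun d => if d < k then pvP N N (d+1) else pvP N N d) := by
  intro k hk
  induction k with
  | zero =>
    rw [show (((0:Nat)):Int) = 0 by norm_num, pyRange_nil le_rfl]
    simp only [List.foldl_nil]
    unfold pvVec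
    apply List.map_congr_left
    intro d _
    rw [if_neg (by omega)]
  | succ k ih =>
    rw [show (((k+1:Nat)):Int) = (k:Int) + 1 by push_cast; ring]
    rw [PySem.List.pyRange_one_succ_right (by omega), List.foldl_append, ih (by omega)]
    simp only [List.foldl_cons, List.foldl_nil]
    have hkL : k < N + 2 + N := by omega
    have hk1L : k + 1 < N + 2 + N := by omega
    rw [show ((k:Int)).toNat = k by omega, show ((k:Int) + pvA).toNat = k + 1 by unfold pvA; omega]
    rw [PySem.List.getD_map_range _ _ _ _ hk1L, if_neg (by omega : ¬ k + 1 < k), set_map_range hkL]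
    apply List.map_congr_left
    intro d hd
    simp only [List.mem_range] at hd
    by_cases h1 : d = k
    · rw [if_pos h1, if_pos (by omega), h1]
    · rw [if_neg h1]
      split_ifs <;> (first | rfl | omega)

lemma A_closed (N : Nat) :
    find_derivative (N : Int) = (List.range (N+1)).map (fun j => pvP N N (j+1)) := by
  simp only [find_derivative]
  rw [show ((N:Int) + pvA).toNat = N + 1 by unfold pvA; omega]
  rw [pvVec_zero]
  rw [show ((N:Int) + 1) = 1 + (N:Int) by ring, pvOuter]
  rw [show ((1:Int) + (N:Int)) = ((N+1 : Nat):Int) by push_cast; ring]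
  rw [pvShift N (N+1) le_rfl]
  rw [PySem.List.slice_to _ (show (0:Int) ≤ ((N+1:Nat):Int) by omega)]
  rw [show (((N+1:Nat):Int)).toNat = N + 1 by omega]
  rw [← List.map_take, List.take_range, show min (N+1) (N+2+N) = N + 1 by omega]
  apply List.map_congr_left
  intro d hd
  simp only [List.mem_range] at hd
  rw [if_pos hd]

lemma desc_self_succ (N : Nat) : (N+1).descFactorial N = (N+1).factorial := by
  induction N with
  | zero => rfl
  | succ N ih => rw [Nat.succ_descFactorial_succ, ih, ← Nat.factorial_succ]

lemma pvFact (m : Nat) :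
    (PySem.List.pyRange 2 (2 + (m:Int)) 1).foldl (fun t k => t * k) 1 = ((m+1).factorial : Int) := by
  induction m with
  | zero => rw [show ((2:Int) + (0:Nat)) = 2 by norm_num, pyRange_nil le_rfl]; simp [Nat.factorial]
  | succ m ih =>
    rw [show ((2:Int) + ((m+1:Nat):Int)) = (2 + (m:Int)) + 1 by push_cast; ring]
    rw [PySem.List.pyRange_one_succ_right (by omega), List.foldl_append, ih]
    simp only [List.foldl_cons, List.foldl_nil]
    have hf : (m+1+1).factorial = (m+1+1) * (m+1).factorial := Nat.factorial_succ _
    rw [hf]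
    push_cast
    ring

lemma pvC_zero (N : Nat) : pvC N 0 = ((N+1).factorial : Int) := by
  unfold pvC
  rw [Nat.sub_zero, desc_self_succ]
  simp

lemma pvC_top (N : Nat) : pvC N (N+1) = 0 := by
  unfold pvC
  rw [Nat.choose_succ_self]
  simp

lemma pvC_div (N k : Nat) (hk : k ≤ N) :
    PySem.Int.floordiv (-(pvC N k) * ((N:Int) - k)) (((k:Int)+1)*((k:Int)+2)) = pvC N (k+1) := by
  have hpos : (0:Int) < ((k:Int)+1)*((k:Int)+2) := by positivity
  have hne : (((k:Int)+1)*((k:Int)+2)) ≠ 0 := ne_of_gt hpos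
  have hid : -(pvC N k) * ((N:Int) - k) = (((k:Int)+1)*((k:Int)+2)) * pvC N (k+1) := by
    by_cases hkN : k = N
    · subst hkN
      rw [pvC_top]
      ring
    · unfold pvC
      have h1 : N - k = (N - (k+1)) + 1 := by omega
      rw [h1, Nat.descFactorial_succ]
      rw [show N + 1 - (N - (k+1)) = k + 2 by omega]
      have hc : ((N.choose (k+1)) : Int) * ((k:Int)+1) = (N.choose k) * ((N:Int) - (k:Int)) := by
        have := Nat.choose_succ_right_eq N k
        have hNk : ((N - k : Nat):Int) = (N:Int) - k := by omega
        calc ((N.choose (k+1)) : Int) * ((k:Int)+1) = ((N.choose (k+1) * (k+1) : Nat) : Int) := by push_cast; ring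
          _ = ((N.choose k * (N - k) : Nat) : Int) := by rw [this]
          _ = (N.choose k) * ((N:Int) - (k:Int)) := by push_cast [hNk]; ring
      rw [pow_succ]
      push_cast
      linear_combination (((-1:Int))^k * ((k:Int)+2) * (((N+1).descFactorial (N - (k+1)) : Nat) : Int)) * hc
  rw [PySem.Int.floordiv_eq_ediv_of_pos hpos, hid, Int.mul_ediv_cancel_left _ hne]

lemma pvBloop (N : Nat) : ∀ k, k ≤ N + 1 →
    ((PySem.List.pyRange 0 (k:Int) 1).foldl
      (fun (s : List Int × Int) j => (s.1 ++ [s.2], PySem.Int.floordiv (-s.2 * ((N:Int) - j)) ((j+1)*(j+2))))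
      ([], pvC N 0))
    = ((List.range k).map (pvC N), pvC N k) := by
  intro k hk
  induction k with
  | zero => rw [show (((0:Nat)):Int) = 0 by norm_num, pyRange_nil le_rfl]; rfl
  | succ k ih =>
    rw [show (((k+1:Nat)):Int) = (k:Int) + 1 by push_cast; ring]
    rw [PySem.List.pyRange_one_succ_right (by omega), List.foldl_append, ih (by omega)]
    simp only [List.foldl_cons, List.foldl_nil]
    rw [List.range_succ, List.map_append]
    have hd := pvC_div N k (by omega)
    simp only [Prod.mk.injEq]
    exact ⟨by simp, hd⟩

lemma B_closed (N : Nat) :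
    find_derivative_alt (N : Int) = (List.range (N+1)).map (pvC N) := by
  simp only [find_derivative_alt]
  rw [show ((N:Int) + 2) = 2 + (N:Int) by ring, pvFact, ← pvC_zero]
  rw [show ((N:Int) + 1) = ((N+1 : Nat):Int) by push_cast; ring]
  rw [pvBloop N (N+1) le_rfl]

lemma bridge (N j : Nat) (hj : j < N + 1) : pvP N N (j+1) = pvC N j := by
  unfold pvP pvC
  rw [if_pos (by omega : j + 1 ≤ N + 1)]
  rw [show N + 1 - (j + 1) = N - j by omega]
  rw [Nat.choose_symm (by omega : j ≤ N)]
  have h2 : ((-1:Int))^j * (-1)^j = 1 := by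
    rw [← pow_add, show j + j = 2 * j by omega, pow_mul]
    norm_num
  have h1 : ((-1:Int))^(N + (N - j)) * (-1)^j = 1 := by
    rw [← pow_add, show N + (N - j) + j = 2 * N by omega, pow_mul]
    norm_num
  have hs : ((-1:Int))^(N + (N - j)) = (-1)^j := by
    calc ((-1:Int))^(N + (N - j)) = ((-1:Int))^(N + (N - j)) * ((-1:Int)^j * (-1)^j) := by rw [h2, mul_one]
      _ = (((-1:Int))^(N + (N - j)) * (-1)^j) * (-1)^j := by ring
      _ = (-1)^j := by rw [h1, one_mul]
  rw [hs]

lemma A_neg (n : Int) (hn : n < 0) : find_derivative n = [] := by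
  simp only [find_derivative]
  rw [show (n + pvA).toNat = 0 by unfold pvA; omega]
  rw [pyRange_nil (by omega : n + 1 ≤ 1), pyRange_nil (by omega : n + 1 ≤ 0)]
  simp only [List.replicate, List.nil_append, List.foldl_nil]
  simp only [PySem.List.slice, PySem.List.clampIdx]
  split_ifs <;> (simp_all; try omega)

lemma B_neg (n : Int) (hn : n < 0) : find_derivative_alt n = [] := by
  simp only [find_derivative_alt]
  rw [pyRange_nil (by omega : n + 2 ≤ 2), pyRange_nil (by omega : n + 1 ≤ 0)]
  rfl


-- ===== VERDICT (by name: the statement is the Claim_ definition above) =====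
theorem find_derivative_spec : Claim_equal_find_derivative := by
  intro n _
  unfold Spec_find_derivative
  by_cases h : 0 ≤ n
  · obtain ⟨N, rfl⟩ : ∃ N : Nat, n = (N : Int) := ⟨n.toNat, by omega⟩
    rw [A_closed, B_closed]
    apply List.map_congr_left
    intro j hj
    simp only [List.mem_range] at hj
    exact bridge N j hj
  · rw [A_neg n (by omega), B_neg n (by omega)]
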